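-- pv_equiv track=rewrite | github.com/paiml/depyler | examples/hard_maximum_product_subarray.py | count_positive_products
-- ===== SOURCE A (Python) =====
-- def count_positive_products(nums: list[int]) -> int:
--     """Count contiguous subarrays with positive product (brute force, small arrays)."""
--     n: int = len(nums)
--     count: int = 0
--     i: int = 0
--     while i < n:
--         prod: int = 1
--         j: int = i
--         while j < n:
--             prod = prod * nums[j]
--             if prod > 0:
--                 count = count + 1
--             j = j + 1
--         i = i + 1
--     return count
-- ===== SOURCE B (Python) =====
-- def count_positive_products(nums: list[int]) -> int:
--     """Count contiguous subarrays with positive product (O(n) DP)."""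
--     total = 0
--     pos = 0  # subarrays ending here with positive product
--     neg = 0  # subarrays ending here with negative product
--     for x in nums:
--         if x > 0:
--             pos, neg = pos + 1, neg
--         elif x < 0:
--             pos, neg = neg, pos + 1
--         else:
--             pos, neg = 0, 0
--         total += pos
--     return total
-- ===== Notes on version B (the rewrite author's own statement) =====
-- stated objective: faster
-- what changed: Replaced the brute-force double loop over all (i,j) start/end pairs with a single-pass DP that maintains the counts of subarrays ending at the current index with positive and negative product, summing the positive count.
import Mathlib
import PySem

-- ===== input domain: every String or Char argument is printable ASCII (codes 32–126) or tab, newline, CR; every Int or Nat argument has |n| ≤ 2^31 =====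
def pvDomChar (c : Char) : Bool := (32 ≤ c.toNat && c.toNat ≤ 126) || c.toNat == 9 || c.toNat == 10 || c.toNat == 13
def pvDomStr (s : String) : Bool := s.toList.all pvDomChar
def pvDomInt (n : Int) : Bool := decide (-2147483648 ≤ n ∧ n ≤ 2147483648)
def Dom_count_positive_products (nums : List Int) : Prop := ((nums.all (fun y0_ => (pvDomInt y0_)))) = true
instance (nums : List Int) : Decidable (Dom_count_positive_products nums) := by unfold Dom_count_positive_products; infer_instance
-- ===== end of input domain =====

-- B replaces A's brute-force O(n^2) double loop with a one-pass DP over counts of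
-- positive/negative-product subarrays ending at each index (objective: faster, asymptotic).

-- ===== PORT A =====
-- literal port of A's two nested while loops: outer over i in range(0, n), inner over
-- j in range(i, n) carrying the pair (prod, count); nums[j] is always in range, so
-- PySem.List.pyGetD with default 0 is exact here.
def count_positive_products (nums : List Int) : Int :=
  -- n = len(nums) inlined as (nums.length : Int)
  (PySem.List.pyRange 0 (nums.length : Int) 1).foldl
    (fun count i =>
      ((PySem.List.pyRange i (nums.length : Int) 1).foldl
        (fun (s : Int × Int) j =>
          let prod := s.1 * PySem.List.pyGetD nums j 0
          (prod, if prod > 0 then s.2 + 1 else s.2))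
        (1, count)).2)
    0

-- ===== PORT B =====
-- literal port of Source B: one fold carrying (total, pos, neg)
def count_positive_products_alt (nums : List Int) : Int :=
  (nums.foldl
    (fun (s : Int × Int × Int) x =>
      let pn : Int × Int :=
        if x > 0 then (s.2.1 + 1, s.2.2)
        else if x < 0 then (s.2.2, s.2.1 + 1)
        else (0, 0)
      (s.1 + pn.1, pn))
    (0, 0, 0)).1

-- ===== PRECONDITION & SPEC =====
def Spec_count_positive_products (nums : List Int) (out : Int) : Prop := out = count_positive_products_alt nums
instance (nums : List Int) (out : Int) : Decidable (Spec_count_positive_products nums out) := by unfold Spec_count_positive_products; infer_instance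

-- ===== CLAIM (what is proved, stated in full; the proofs are below) =====
def Claim_equal_count_positive_products : Prop := ∀ (nums : List Int), Dom_count_positive_products nums → Spec_count_positive_products nums (count_positive_products nums)

-- ===== LEMMAS AND PROOFS =====

-- number of nonempty prefixes q of l with p * (prod q) > 0 (A's inner loop count)
def icP (l : List Int) (p : Int) : Int :=
  match l with
  | [] => 0
  | x :: r => (if p * x > 0 then 1 else 0) + icP r (p * x)

-- number of nonempty prefixes q of l with p * (prod q) < 0
def icN (l : List Int) (p : Int) : Int :=
  match l with
  | [] => 0
  | x :: r => (if p * x < 0 then 1 else 0) + icN r (p * x)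

-- A's total: sum of icP over the suffixes
def acnt : List Int → Int
  | [] => 0
  | x :: r => icP (x :: r) 1 + acnt r

-- B's DP increments, from seeds (p, n)
def gcnt : List Int → Int → Int → Int
  | [], _, _ => 0
  | x :: r, p, n =>
    if x > 0 then (p + 1) + gcnt r (p + 1) n
    else if x < 0 then n + gcnt r n (p + 1)
    else 0 + gcnt r 0 0

-- A's inner fold computes icP
theorem innerA_fold (l : List Int) (p c : Int) :
    (l.foldl (fun (s : Int × Int) x =>
        let prod := s.1 * x
        (prod, if prod > 0 then s.2 + 1 else s.2)) (p, c)).2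
      = c + icP l p := by
  induction l generalizing p c with
  | nil => simp [icP]
  | cons x r ih => simp only [List.foldl_cons, icP, ih]; split_ifs <;> ring

-- A's outer fold over List.range sums icP over the suffixes
theorem outerA_fold (l : List Int) (c : Int) :
    (List.range l.length).foldl (fun c k => c + icP (l.drop k) 1) c = c + acnt l := by
  induction l generalizing c with
  | nil => simp [acnt]
  | cons x r ih =>
      rw [show (x :: r).length = r.length + 1 from rfl, List.range_succ_eq_map,
          List.foldl_cons, List.foldl_map]
      simp only [List.drop_zero, List.drop_succ_cons]
      rw [ih]
      simp [acnt]; ring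

-- the port of A equals acnt
theorem portA_eq (nums : List Int) : count_positive_products nums = acnt nums := by
  unfold count_positive_products
  rw [PySem.List.pyRange_one]
  simp only [Int.sub_zero, Int.toNat_natCast, List.foldl_map, Int.zero_add]
  rw [PySem.List.foldl_congr_mem (List.range nums.length) _
        (fun (c : Int) (k : Nat) => c + icP (nums.drop k) 1) 0 ?_]
  · rw [outerA_fold nums 0]; ring
  · intro c k _
    have h := PySem.List.foldl_pyRange_pyGetD' nums 0
        (fun (s : Int × Int) x => (s.1 * x, if s.1 * x > 0 then s.2 + 1 else s.2))
        ((1 : Int), c) (a := (k : Int)) (by positivity)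
    simp only [Int.toNat_natCast] at h
    simp only [h]
    exact innerA_fold (nums.drop k) 1 c

-- B's fold carries its running total outside gcnt
theorem portB_fold (l : List Int) (t p n : Int) :
    (l.foldl
      (fun (s : Int × Int × Int) x =>
        let pn : Int × Int :=
          if x > 0 then (s.2.1 + 1, s.2.2)
          else if x < 0 then (s.2.2, s.2.1 + 1)
          else (0, 0)
        (s.1 + pn.1, pn))
      (t, p, n)).1 = t + gcnt l p n := by
  induction l generalizing t p n with
  | nil => simp [gcnt]
  | cons x r ih =>
      simp only [List.foldl_cons, gcnt]
      split_ifs <;> simp [ih] <;> ring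

-- icP/icN depend only on the sign of the seed product
theorem ic_sign (l : List Int) :
    ∀ p : Int, (0 < p → icP l p = icP l 1 ∧ icN l p = icN l 1) ∧
               (p < 0 → icP l p = icN l 1 ∧ icN l p = icP l 1) ∧
               (p = 0 → icP l p = 0 ∧ icN l p = 0) := by
  induction l with
  | nil => intro p; simp [icP, icN]
  | cons x r ih =>
      intro p
      refine ⟨fun hp => ?_, fun hp => ?_, fun hp => ?_⟩
      · rcases lt_trichotomy x 0 with hx | hx | hx
        · have h1 : p * x < 0 := mul_neg_of_pos_of_neg hp hx
          have h2 : (1 : Int) * x < 0 := by simpa using hx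
          simp only [icP, icN, if_neg (not_lt.mpr h1.le), if_pos h1,
            if_neg (not_lt.mpr h2.le), if_pos h2]
          have := ((ih (p * x)).2.1 h1)
          have h2' := ((ih (1 * x)).2.1 h2)
          constructor <;> omega
        · subst hx
          have h0 := (ih 0).2.2 rfl
          simp [icP, icN, h0.1, h0.2]
        · have h1 : 0 < p * x := mul_pos hp hx
          have h2 : 0 < (1 : Int) * x := by simpa using hx
          simp only [icP, icN, if_pos h1, if_neg (not_lt.mpr h1.le),
            if_pos h2, if_neg (not_lt.mpr h2.le)]
          have := (ih (p * x)).1 h1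
          have h2' := (ih (1 * x)).1 h2
          constructor <;> omega
      · rcases lt_trichotomy x 0 with hx | hx | hx
        · have h1 : 0 < p * x := mul_pos_of_neg_of_neg hp hx
          have h2 : (1 : Int) * x < 0 := by simpa using hx
          simp only [icP, icN, if_pos h1, if_neg (not_lt.mpr h1.le),
            if_neg (not_lt.mpr h2.le), if_pos h2]
          have := (ih (p * x)).1 h1
          have h2' := (ih (1 * x)).2.1 h2
          constructor <;> omega
        · subst hx
          have h0 := (ih 0).2.2 rfl
          simp [icP, icN, h0.1, h0.2]
        · have h1 : p * x < 0 := mul_neg_of_neg_of_pos hp hx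
          have h2 : 0 < (1 : Int) * x := by simpa using hx
          simp only [icP, icN, if_neg (not_lt.mpr h1.le), if_pos h1,
            if_pos h2, if_neg (not_lt.mpr h2.le)]
          have := (ih (p * x)).2.1 h1
          have h2' := (ih (1 * x)).1 h2
          constructor <;> omega
      · subst hp
        have h0 := (ih 0).2.2 rfl
        simp [icP, icN, h0.1, h0.2]
  
-- B's DP equals A's suffix sum plus the seeds' extension counts
theorem gcnt_eq (l : List Int) : ∀ p n : Int,
    gcnt l p n = acnt l + p * icP l 1 + n * icN l 1 := by
  induction l with
  | nil => intro p n; simp [gcnt, acnt, icP, icN]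
  | cons x r ih =>
      intro p n
      rcases lt_trichotomy x 0 with hx | hx | hx
      · have hP : icP (x :: r) 1 = icN r 1 := by
          have h2 : (1 : Int) * x < 0 := by simpa using hx
          simp only [icP, if_neg (not_lt.mpr h2.le)]
          have := (ic_sign r (1 * x)).2.1 h2
          omega
        have hN : icN (x :: r) 1 = 1 + icP r 1 := by
          have h2 : (1 : Int) * x < 0 := by simpa using hx
          simp only [icN, if_pos h2]
          have := (ic_sign r (1 * x)).2.1 h2
          omega
        simp only [gcnt, if_neg (not_lt.mpr hx.le), if_pos hx, acnt, ih, hP, hN]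
        ring_nf
      · subst hx
        have h0 := (ic_sign r (1 * 0)).2.2 (by ring)
        have hP : icP ((0:Int) :: r) 1 = 0 := by
          simp only [icP]; simp_all
        have hN : icN ((0:Int) :: r) 1 = 0 := by
          simp only [icN]; simp_all
        simp [gcnt, acnt, ih, hP, hN]
      · have h2 : 0 < (1 : Int) * x := by simpa using hx
        have hs := (ic_sign r (1 * x)).1 h2
        have hP : icP (x :: r) 1 = 1 + icP r 1 := by
          simp only [icP, if_pos h2]; omega
        have hN : icN (x :: r) 1 = icN r 1 := by
          simp only [icN, if_neg (not_lt.mpr h2.le)]; omega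
        simp only [gcnt, if_pos hx, acnt, ih, hN]
        rw [hP]
        ring

theorem portB_eq (nums : List Int) : count_positive_products_alt nums = acnt nums := by
  unfold count_positive_products_alt
  rw [portB_fold nums 0 0 0, gcnt_eq]
  ring

-- ===== VERDICT (by name: the statement is the Claim_ definition above) =====
theorem count_positive_products_spec : Claim_equal_count_positive_products := by
  intro nums _
  unfold Spec_count_positive_products
  rw [portA_eq, portB_eq]
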